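-- pv_equiv track=rewrite | github.com/gltn/stdm | data/configuration/social_tenure_updater.py | _set_distinct_column
-- ===== SOURCE A (Python) =====
-- def _abs_column_name(name):
--     # Returns the absolute column name from the pseudo name
--     if 'AS' in name:
--         names = name.split('AS')
--         name = names[0].strip()
--
--     return name
--
-- def _insert_distinct_exp(abs_name, pseudo_name):
--     # Insert the DISTINCT ON expression for the given column name
--     return 'DISTINCT ON ({0}) {1}'.format(abs_name, pseudo_name)
--
-- def _set_distinct_column(column, column_collection):
--     # Re-arrange the list to that the distinct column is inserted at the
--     # top and DISTINCT keyword is included as well.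
--     rev = []
--
--     for c in column_collection[:]:
--         norm_c = _abs_column_name(c)
--
--         if norm_c == column:
--             column_collection.remove(c)
--             distinct_exp = _insert_distinct_exp(norm_c, c)
--             rev.append(distinct_exp)
--
--     rev.extend(column_collection)
--
--     return rev
-- ===== SOURCE B (Python) =====
-- # Declarative rewrite: two comprehensions (matched expressions / unmatched columns)
-- # instead of A's remove-in-loop over a copy; mutates column_collection in place via
-- # slice assignment as A does.
--
-- def _abs_column_name(name):
--     if 'AS' in name:
--         names = name.split('AS')
--         name = names[0].strip()
--     return name
--
--
-- def _insert_distinct_exp(abs_name, pseudo_name):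
--     return 'DISTINCT ON ({0}) {1}'.format(abs_name, pseudo_name)
--
--
-- def _set_distinct_column(column, column_collection):
--     matched = [_insert_distinct_exp(column, c)
--                for c in column_collection if _abs_column_name(c) == column]
--     unmatched = [c for c in column_collection if _abs_column_name(c) != column]
--     column_collection[:] = unmatched
--     return matched + unmatched
-- ===== Notes on version B (the rewrite author's own statement) =====
-- stated objective: simpler
-- what changed: Replaces A's remove-in-loop over a copy with two declarative comprehensions (matched DISTINCT expressions and unmatched columns) concatenated, slice-assigning the unmatched bucket back so the caller observes the same in-place removal.
import Mathlib
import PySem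

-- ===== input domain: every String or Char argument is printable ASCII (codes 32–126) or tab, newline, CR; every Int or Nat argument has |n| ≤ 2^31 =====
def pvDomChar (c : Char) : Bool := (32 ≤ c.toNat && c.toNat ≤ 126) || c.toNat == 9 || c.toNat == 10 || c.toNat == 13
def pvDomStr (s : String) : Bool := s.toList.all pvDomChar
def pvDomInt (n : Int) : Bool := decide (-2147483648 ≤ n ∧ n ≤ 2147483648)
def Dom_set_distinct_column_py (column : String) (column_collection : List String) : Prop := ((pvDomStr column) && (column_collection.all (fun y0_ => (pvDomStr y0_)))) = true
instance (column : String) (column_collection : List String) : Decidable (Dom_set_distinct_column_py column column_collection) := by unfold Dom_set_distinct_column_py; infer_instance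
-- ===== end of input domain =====

-- ===== PORT A =====
-- B replaces the remove-in-loop by two declarative comprehensions; A's in-place
-- mutation of column_collection is reproduced by B's slice assignment (the
-- equivalence proved here is about the return value).
-- helper: _abs_column_name
def absColumnName (name : String) : String :=
  if PySem.Str.isIn "AS" name then
    -- names = name.split('AS'); name = names[0].strip()   (sep "AS" ≠ "", split? never none)
    PySem.Str.strip (PySem.List.pyGetD ((PySem.Str.split? name "AS").getD []) 0 "")
  else name

-- helper: _insert_distinct_exp  ('DISTINCT ON ({0}) {1}'.format(abs_name, pseudo_name))
def insertDistinctExp (absName pseudoName : String) : String :=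
  PySem.Str.join "" ["DISTINCT ON (", absName, ") ", pseudoName]

-- A's loop body: if norm_c == column, remove c from the collection and append the
-- DISTINCT expression to rev (remove? never fails here: c is in the collection)
def aStep (column : String) (s : List String × List String) (c : String) :
    List String × List String :=
  let norm_c := absColumnName c
  if norm_c = column then
    (s.1 ++ [insertDistinctExp norm_c c], (PySem.List.remove? s.2 c).getD s.2)
  else s

def set_distinct_column_py (column : String) (column_collection : List String) : List String :=
  -- rev = []; for c in column_collection[:]: … ; rev.extend(column_collection); return rev
  -- state = (rev, current column_collection)
  let st := column_collection.foldl (aStep column) ([], column_collection)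
  st.1 ++ st.2

-- ===== PORT B =====
def set_distinct_column_py_alt (column : String) (column_collection : List String) : List String :=
  -- matched = [_insert_distinct_exp(column, c) for c in column_collection if _abs_column_name(c) == column]
  -- unmatched = [c for c in column_collection if _abs_column_name(c) != column]
  -- return matched + unmatched
  ((column_collection.filter (fun c => absColumnName c == column)).map
      (fun c => insertDistinctExp column c))
    ++ column_collection.filter (fun c => absColumnName c != column)

-- ===== PRECONDITION & SPEC =====
def Spec_set_distinct_column_py (column : String) (column_collection : List String) (out : List String) : Prop := out = set_distinct_column_py_alt column column_collection
instance (column : String) (column_collection : List String) (out : List String) : Decidable (Spec_set_distinct_column_py column column_collection out) := by unfold Spec_set_distinct_column_py; infer_instance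

-- ===== CLAIM (what is proved, stated in full; the proofs are below) =====
def Claim_equal_set_distinct_column_py : Prop := ∀ (column : String) (column_collection : List String), Dom_set_distinct_column_py column column_collection → Spec_set_distinct_column_py column column_collection (set_distinct_column_py column column_collection)

-- ===== LEMMAS AND PROOFS =====

-- A's loop: if the already-kept prefix P contains no matched column, each matched c is
-- removed from the head of the unprocessed suffix, so the loop partitions the list.
theorem a_loop (column : String) (xs P r : List String)
    (hP : ∀ x ∈ P, absColumnName x ≠ column) :
    xs.foldl (aStep column) (r, P ++ xs)
      = (r ++ (xs.filter (fun c => absColumnName c == column)).map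
            (fun c => insertDistinctExp (absColumnName c) c),
         P ++ xs.filter (fun c => !(absColumnName c == column))) := by
  induction xs generalizing P r with
  | nil => simp
  | cons c xs ih =>
    by_cases h : absColumnName c = column
    · have hrem : PySem.List.remove? (P ++ c :: xs) c = some (P ++ xs) := by
        have hmem : c ∈ P ++ c :: xs := by simp
        have hcP : c ∉ P := fun hc => hP c hc h
        rw [PySem.List.remove?_eq_some_erase _ _ hmem,
            List.erase_append_right _ hcP]
        simp
      have hstep : aStep column (r, P ++ c :: xs) c
          = (r ++ [insertDistinctExp (absColumnName c) c], P ++ xs) := by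
        simp [aStep, h, hrem]
      rw [List.foldl_cons, hstep, ih P _ hP]
      simp [h]
    · have hP' : ∀ x ∈ P ++ [c], absColumnName x ≠ column := by
        intro x hx
        rcases List.mem_append.1 hx with hx | hx
        · exact hP x hx
        · simp at hx; subst hx; exact h
      have hstep : aStep column (r, P ++ c :: xs) c = (r, (P ++ [c]) ++ xs) := by
        simp [aStep, h]
      rw [List.foldl_cons, hstep, ih (P ++ [c]) r hP']
      simp [h]

-- ===== VERDICT (by name: the statement is the Claim_ definition above) =====
theorem set_distinct_column_py_spec : Claim_equal_set_distinct_column_py := by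
  intro column xs _
  unfold Spec_set_distinct_column_py set_distinct_column_py set_distinct_column_py_alt
  rw [show xs.foldl (aStep column) ([], xs) = xs.foldl (aStep column) ([], [] ++ xs) by simp,
      a_loop column xs [] [] (by simp)]
  have hmap : (xs.filter (fun c => absColumnName c == column)).map
        (fun c => insertDistinctExp (absColumnName c) c)
      = (xs.filter (fun c => absColumnName c == column)).map
        (fun c => insertDistinctExp column c) := by
    apply List.map_congr_left
    intro c hc
    have := List.of_mem_filter hc
    simp at this
    rw [this]
  have hfil : xs.filter (fun c => !(absColumnName c == column))
      = xs.filter (fun c => absColumnName c != column) := by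
    apply List.filter_congr; intro c _; simp [bne]
  simp [hmap, hfil]
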